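-- pv_equiv track=rewrite | github.com/alephdata/followthemoney | followthemoney/helpers.py | remove_prefix_date_values
-- ===== SOURCE A (Python) =====
-- from typing import Iterable, List, Optional, Set
--
-- def remove_prefix_date_values(values: Iterable[str]) -> List[str]:
--     """See ``remove_prefix_dates``."""
--     kept: List[str] = []
--     values = sorted(values, key=len, reverse=True)
--     for index, value in enumerate(values):
--         keep = True
--         for longer in values[:index]:
--             if longer.startswith(value):
--                 keep = False
--                 break
--         if keep:
--             kept.append(value)
--     return kept
-- ===== SOURCE B (Python) =====
-- def remove_prefix_date_values(values):
--     """See ``remove_prefix_dates``."""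
--     vals = sorted(values, key=len, reverse=True)
--     distinct = sorted(set(vals))
--     is_prefix = set()
--     for a, b in zip(distinct, distinct[1:]):
--         if b.startswith(a):
--             is_prefix.add(a)
--     seen = set()
--     out = []
--     for v in vals:
--         if v in is_prefix or v in seen:
--             continue
--         seen.add(v)
--         out.append(v)
--     return out
-- ===== Notes on version B (the rewrite author's own statement) =====
-- stated objective: faster
-- what changed: Replaces the quadratic scan of all earlier (longer) values for each value by a lexicographic sort of the distinct values, where a value is a proper prefix of some other value iff it is a prefix of its immediate lexicographic successor; plus a seen-set for deduplication.
import Mathlib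
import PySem

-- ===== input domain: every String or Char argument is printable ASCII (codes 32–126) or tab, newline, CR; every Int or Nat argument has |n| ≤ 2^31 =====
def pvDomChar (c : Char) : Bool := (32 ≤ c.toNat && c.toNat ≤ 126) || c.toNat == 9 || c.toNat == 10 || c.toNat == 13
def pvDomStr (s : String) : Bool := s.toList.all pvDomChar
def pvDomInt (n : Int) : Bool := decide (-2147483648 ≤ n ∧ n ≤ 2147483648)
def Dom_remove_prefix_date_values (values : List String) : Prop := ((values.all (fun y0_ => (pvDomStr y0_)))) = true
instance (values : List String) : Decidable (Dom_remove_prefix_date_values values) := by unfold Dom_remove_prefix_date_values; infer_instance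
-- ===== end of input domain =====

-- B replaces A's quadratic earlier-values scan by a lexicographic sort of the distinct values
-- (a value is a proper prefix of another iff it is a prefix of its lexicographic successor); objective: faster.


-- ===== PORT A =====
def remove_prefix_date_values (values : List String) : List String :=
  let values2 := PySem.List.sorted values (fun v => PySem.Str.len v) true
  (PySem.List.enumerate values2 0).foldl
    (fun kept iv =>
      let keep := (PySem.List.slice values2 none (some iv.1)).all
        (fun longer => ! PySem.Str.startswith longer iv.2)
      if keep then kept ++ [iv.2] else kept) []

-- ===== PORT B =====
def remove_prefix_date_values_alt (values : List String) : List String :=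
  let vals := PySem.List.sorted values (fun v => PySem.Str.len v) true
  let distinct := PySem.List.sorted (PySem.Set.ofList vals) (fun v => v) false
  let isPre := (distinct.zip distinct.tail).foldl
      (fun s ab => if PySem.Str.startswith ab.2 ab.1 then PySem.Set.add s ab.1 else s)
      PySem.Set.empty
  (vals.foldl
    (fun st v =>
      if PySem.Set.contains isPre v || PySem.Set.contains st.1 v then st
      else (PySem.Set.add st.1 v, st.2 ++ [v]))
    ((PySem.Set.empty : PySem.Set String), ([] : List String))).2

-- ===== PRECONDITION & SPEC =====
def Spec_remove_prefix_date_values (values : List String) (out : List String) : Prop := out = remove_prefix_date_values_alt values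
instance (values : List String) (out : List String) : Decidable (Spec_remove_prefix_date_values values out) := by unfold Spec_remove_prefix_date_values; infer_instance

-- ===== CLAIM (what is proved, stated in full; the proofs are below) =====
def Claim_equal_remove_prefix_date_values : Prop := ∀ (values : List String), Dom_remove_prefix_date_values values → Spec_remove_prefix_date_values values (remove_prefix_date_values values)

-- ===== LEMMAS AND PROOFS =====

-- the length-descending stable sort both programs start with
def pvS (values : List String) : List String :=
  PySem.List.sorted values (fun v => PySem.Str.len v) true

-- B's lexicographically sorted distinct values
def pvD (values : List String) : List String :=
  PySem.List.sorted (PySem.Set.ofList (pvS values)) (fun v => v) false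

-- B's set of values that are proper prefixes of some other value
def pvIsPre (values : List String) : PySem.Set String :=
  ((pvD values).zip (pvD values).tail).foldl
      (fun s ab => if PySem.Str.startswith ab.2 ab.1 then PySem.Set.add s ab.1 else s)
      PySem.Set.empty

-- A's fold step
def pvAf (values : List String) : List String → Int × String → List String :=
  fun kept iv =>
      let keep := (PySem.List.slice (pvS values) none (some iv.1)).all
        (fun longer => ! PySem.Str.startswith longer iv.2)
      if keep then kept ++ [iv.2] else kept

-- B's fold step
def pvBf (values : List String) : PySem.Set String × List String → String → PySem.Set String × List String :=
  fun st v =>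
      if PySem.Set.contains (pvIsPre values) v || PySem.Set.contains st.1 v then st
      else (PySem.Set.add st.1 v, st.2 ++ [v])

-- "v is a proper prefix of some element of values"
def pvBig (values : List String) (v : String) : Prop :=
  ∃ w ∈ values, v.toList.length < w.toList.length ∧ v.toList <+: w.toList

lemma pvA_eq (values : List String) :
    remove_prefix_date_values values = (PySem.List.enumerate (pvS values) 0).foldl (pvAf values) [] := rfl

lemma pvB_eq (values : List String) :
    remove_prefix_date_values_alt values = ((pvS values).foldl (pvBf values) (PySem.Set.empty, [])).2 := rfl

-- a proper prefix is lexicographically smaller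
lemma pvPrefix_lt (v w : List Char) (h : v <+: w) (hne : v ≠ w) : List.Lex (·<·) v w := by
  induction v generalizing w with
  | nil => cases w with
    | nil => exact absurd rfl hne
    | cons b bs => exact List.Lex.nil
  | cons a as ih =>
    obtain ⟨t, ht⟩ := h
    cases w with
    | nil => simp at ht
    | cons b bs =>
      obtain ⟨rfl, h2⟩ := by simpa using ht
      exact List.Lex.cons (ih bs ⟨t, h2⟩ (by rintro rfl; exact hne rfl))

-- betweenness: anything between a string and an extension of it extends it too
lemma pvBetween (v s w : List Char) (hvw : v <+: w) (hvs : List.Lex (·<·) v s)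
    (hsw : s = w ∨ List.Lex (·<·) s w) : v <+: s := by
  induction v generalizing s w with
  | nil => exact List.nil_prefix
  | cons a as ih =>
    obtain ⟨t, ht⟩ := hvw
    cases w with
    | nil => simp at ht
    | cons b bs =>
      obtain ⟨rfl, h2⟩ := by simpa using ht
      cases hvs with
      | cons h3 =>
        rename_i ss
        have hsw' : ss = bs ∨ List.Lex (·<·) ss bs := by
          cases hsw with
          | inl h => injection h with h4 h5; exact Or.inl h5
          | inr h => cases h with
            | cons h' => exact Or.inr h'
            | rel h' => exact absurd h' (lt_irrefl a)
        exact List.cons_prefix_cons.mpr ⟨rfl, ih ss bs ⟨t, h2⟩ h3 hsw'⟩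
      | rel h3 =>
        rename_i c ss
        exfalso
        cases hsw with
        | inl h => injection h with h4 h5; exact absurd h4 (ne_of_gt h3)
        | inr h => cases h with
          | cons h' => exact lt_irrefl a h3
          | rel h' => exact lt_asymm h3 h'

-- adjacency via zip with the tail
lemma pvMem_zip_tail {α : Type} (D : List α) (p : α × α) :
    p ∈ D.zip D.tail ↔ ∃ i, ∃ h : i + 1 < D.length, D[i] = p.1 ∧ D[i+1] = p.2 := by
  rw [List.mem_iff_getElem]
  have hlen : (D.zip D.tail).length = min D.length (D.length - 1) := by
    rw [List.length_zip, List.length_tail]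
  constructor
  · rintro ⟨i, hi, hp⟩
    have hi' : i + 1 < D.length := by omega
    have hz := List.getElem_zip (l := D) (l' := D.tail) (i := i) (h := hi)
    rw [hz] at hp
    refine ⟨i, hi', ?_, ?_⟩
    · rw [← hp]
    · rw [← hp]; simp [List.getElem_tail]
  · rintro ⟨i, hi, h1, h2⟩
    have hi' : i < (D.zip D.tail).length := by omega
    refine ⟨i, hi', ?_⟩
    rw [List.getElem_zip]
    simp [List.getElem_tail, h1, h2]

-- membership in the fold that builds the prefix set
lemma pvMem_foldIsPre (pairs : List (String × String)) (s0 : PySem.Set String) (x : String) :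
    x ∈ pairs.foldl (fun s ab => if PySem.Str.startswith ab.2 ab.1 then PySem.Set.add s ab.1 else s) s0
      ↔ x ∈ s0 ∨ ∃ ab ∈ pairs, PySem.Str.startswith ab.2 ab.1 = true ∧ ab.1 = x := by
  induction pairs generalizing s0 with
  | nil => simp
  | cons p ps ih =>
    simp only [List.foldl_cons]
    by_cases h : PySem.Str.startswith p.2 p.1 = true
    · rw [if_pos h, ih]
      simp only [PySem.Set.mem_add, List.exists_mem_cons_iff, h, true_and]
      constructor
      · rintro ((hs | rfl) | hex)
        · exact Or.inl hs
        · exact Or.inr (Or.inl rfl)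
        · exact Or.inr (Or.inr hex)
      · rintro (hs | (rfl | hex))
        · exact Or.inl (Or.inl hs)
        · exact Or.inl (Or.inr rfl)
        · exact Or.inr hex
    · rw [if_neg h, ih]
      simp only [List.exists_mem_cons_iff, h]
      tauto

lemma pvMem_pvS (values : List String) (x : String) : x ∈ pvS values ↔ x ∈ values := by
  unfold pvS; simp [PySem.List.mem_sorted]

lemma pvMem_pvD (values : List String) (x : String) : x ∈ pvD values ↔ x ∈ values := by
  unfold pvD
  simp [PySem.List.mem_sorted, PySem.Set.mem_ofList, pvMem_pvS]

lemma pvD_pairwise (values : List String) : (pvD values).Pairwise (· < ·) :=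
  PySem.List.sorted_ofList_pairwise_lt (pvS values)

-- characterization of B's prefix set
lemma pvContains_isPre (values : List String) (x : String) :
    PySem.Set.contains (pvIsPre values) x = true ↔ x ∈ values ∧ pvBig values x := by
  have pw := List.pairwise_iff_getElem.mp (pvD_pairwise values)
  rw [PySem.Set.contains_iff]
  unfold pvIsPre
  rw [pvMem_foldIsPre]
  simp only [PySem.Set.empty, List.not_mem_nil, false_or]
  constructor
  · rintro ⟨ab, hmem, hsw, rfl⟩
    obtain ⟨i, hi, h1, h2⟩ := (pvMem_zip_tail _ _).mp hmem
    have hxD : ab.1 ∈ pvD values := h1 ▸ (pvD values).getElem_mem (by omega)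
    have hbD : ab.2 ∈ pvD values := h2 ▸ (pvD values).getElem_mem hi
    have hlt : ab.1 < ab.2 := by
      have := pw i (i+1) (by omega) hi (by omega)
      rwa [h1, h2] at this
    have hpre : ab.1.toList <+: ab.2.toList := by
      rw [PySem.Str.startswith_eq] at hsw
      exact (PySem.Chars.startswith_iff _ _).mp hsw
    have hne : ab.1.toList ≠ ab.2.toList := by
      intro hEq
      exact absurd (String.toList_inj.mp hEq ▸ hlt) (lt_irrefl _)
    have hlen : ab.1.toList.length < ab.2.toList.length := by
      rcases lt_or_eq_of_le hpre.length_le with h | h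
      · exact h
      · exact absurd (hpre.eq_of_length h) hne
    exact ⟨(pvMem_pvD values _).mp hxD, ab.2, (pvMem_pvD values _).mp hbD, hlen, hpre⟩
  · rintro ⟨hx, w, hw, hlen, hpre⟩
    have hxD : x ∈ pvD values := (pvMem_pvD values x).mpr hx
    have hwD : w ∈ pvD values := (pvMem_pvD values w).mpr hw
    obtain ⟨i, hi, hDi⟩ := List.mem_iff_getElem.mp hxD
    obtain ⟨j, hj, hDj⟩ := List.mem_iff_getElem.mp hwD
    have hneL : x.toList ≠ w.toList := fun hEq => by simp [hEq] at hlen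
    have hltL : List.Lex (·<·) x.toList w.toList := pvPrefix_lt _ _ hpre hneL
    have hlt : x < w := String.lt_iff_toList_lt.mpr hltL
    have hij : i < j := by
      rcases lt_trichotomy i j with h | h | h
      · exact h
      · subst h; exact absurd (hDi.symm.trans hDj) (fun hEq : x = w => hneL (by rw [hEq]))
      · exact absurd (hDj ▸ hDi ▸ pw j i hj hi h) (fun hwx => absurd (hlt.trans hwx) (lt_irrefl x))
    have hi1 : i + 1 < (pvD values).length := by omega
    have hxb : x < (pvD values)[i+1] := hDi ▸ pw i (i+1) (by omega) hi1 (by omega)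
    have hbw : (pvD values)[i+1] = w ∨ (pvD values)[i+1] < w := by
      rcases eq_or_lt_of_le (by omega : i + 1 ≤ j) with rfl | h
      · exact Or.inl hDj
      · exact Or.inr (hDj ▸ pw (i+1) j hi1 hj h)
    have hpreb : x.toList <+: (pvD values)[i+1].toList := by
      refine pvBetween _ _ w.toList hpre (String.lt_iff_toList_lt.mp hxb) ?_
      rcases hbw with h | h
      · exact Or.inl (by rw [h])
      · exact Or.inr (String.lt_iff_toList_lt.mp h)
    refine ⟨(x, (pvD values)[i+1]), ?_, ?_, rfl⟩
    · exact (pvMem_zip_tail _ _).mpr ⟨i, hi1, hDi, rfl⟩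
    · rw [PySem.Str.startswith_eq]
      exact (PySem.Chars.startswith_iff _ _).mpr hpreb

-- lengths in pvS are non-increasing
lemma pvS_len_mono (values : List String) :
    (pvS values).Pairwise (fun a b => b.toList.length ≤ a.toList.length) := by
  have h := PySem.List.sorted_pairwise_rev values (fun v => PySem.Str.len v)
  refine h.imp ?_
  intro a b hab
  simpa [PySem.Str.len] using hab

-- A's keep-condition at index k, rephrased
lemma pvCondA (values : List String) (k : Nat) (hk : k < (pvS values).length) :
    (((pvS values).take k).all (fun longer => ! PySem.Str.startswith longer (pvS values)[k]) = true)
      ↔ ((pvS values)[k] ∉ (pvS values).take k ∧ ¬ pvBig values (pvS values)[k]) := by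
  have lenpw := List.pairwise_iff_getElem.mp (pvS_len_mono values)
  rw [List.all_eq_true]
  constructor
  · intro H
    constructor
    · intro hmem
      have h2 : PySem.Chars.startswith (pvS values)[k].toList (pvS values)[k].toList = false := by
        simpa using H _ hmem
      have h3 := (PySem.Chars.startswith_iff (pvS values)[k].toList (pvS values)[k].toList).mpr
        (List.prefix_refl _)
      rw [h2] at h3
      exact Bool.false_ne_true h3
    · rintro ⟨w, hw, hlen, hpre⟩
      obtain ⟨j, hj, hSj⟩ := List.mem_iff_getElem.mp ((pvMem_pvS values w).mpr hw)
      have hjk : j < k := by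
        by_contra hge
        rw [not_lt] at hge
        rcases eq_or_lt_of_le hge with rfl | hlt
        · rw [hSj] at hlen; omega
        · have := lenpw k j hk hj hlt
          rw [hSj] at this; omega
      have hmemtake : w ∈ (pvS values).take k := by
        have hjt : j < ((pvS values).take k).length := by
          simp [List.length_take]; omega
        have : ((pvS values).take k)[j] = w := by rw [List.getElem_take, hSj]
        exact this ▸ ((pvS values).take k).getElem_mem hjt
      have h2 : PySem.Chars.startswith w.toList (pvS values)[k].toList = false := by
        simpa using H _ hmemtake
      have h3 := (PySem.Chars.startswith_iff w.toList (pvS values)[k].toList).mpr hpre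
      rw [h2] at h3
      exact Bool.false_ne_true h3
  · rintro ⟨hnm, hnb⟩ longer hmem
    obtain ⟨j, hjt, hSj⟩ := List.mem_iff_getElem.mp hmem
    have hjk : j < k := by simp [List.length_take] at hjt; omega
    have hjlen : j < (pvS values).length := by simp [List.length_take] at hjt; omega
    rw [List.getElem_take] at hSj
    simp only [Bool.not_eq_true', PySem.Str.startswith_eq]
    by_contra hsw
    rw [Bool.not_eq_false] at hsw
    have hpre : (pvS values)[k].toList <+: longer.toList :=
      (PySem.Chars.startswith_iff _ _).mp hsw
    rcases lt_or_eq_of_le hpre.length_le with hlt | heq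
    · refine hnb ⟨longer, ?_, hlt, hpre⟩
      exact (pvMem_pvS values longer).mp (hSj ▸ (pvS values).getElem_mem hjlen)
    · have : (pvS values)[k] = longer := String.toList_inj.mp (hpre.eq_of_length heq)
      exact hnm (this ▸ hmem)

-- the two folds agree, given the seen-set invariant
lemma pvMain (values : List String) :
    ∀ (xs : List String) (k : Nat) (kept : List String) (seen : PySem.Set String),
      (pvS values).drop k = xs →
      (∀ u, PySem.Set.contains seen u = true ↔
         (u ∈ (pvS values).take k ∧ PySem.Set.contains (pvIsPre values) u = false)) →
      (PySem.List.enumerate xs (k : Int)).foldl (pvAf values) kept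
        = (xs.foldl (pvBf values) (seen, kept)).2 := by
  intro xs
  induction xs with
  | nil => intro k kept seen _ _; simp [PySem.List.enumerate]
  | cons v rest ih =>
    intro k kept seen hdrop hseen
    have hk : k < (pvS values).length := by
      by_contra hge
      rw [List.drop_eq_nil_of_le (by omega)] at hdrop
      simp at hdrop
    have hSk : (pvS values)[k] = v := by
      have h0 : ((pvS values).drop k)[0]'(by rw [hdrop]; simp) = (pvS values)[k + 0] :=
        List.getElem_drop
      simpa [hdrop] using h0.symm
    have hdrop' : (pvS values).drop (k+1) = rest := by
      rw [← List.tail_drop, hdrop]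
      rfl
    have hvv : v ∈ values := (pvMem_pvS values v).mp (hSk ▸ (pvS values).getElem_mem hk)
    have hcond := pvCondA values k hk
    rw [hSk] at hcond
    have hbigiff : PySem.Set.contains (pvIsPre values) v = true ↔ pvBig values v := by
      rw [pvContains_isPre]
      exact ⟨fun h => h.2, fun h => ⟨hvv, h⟩⟩
    have htake : (pvS values).take (k+1) = (pvS values).take k ++ [v] := by
      rw [List.take_add_one, List.getElem?_eq_getElem hk, hSk]
      rfl
    rw [PySem.List.enumerate_cons, List.foldl_cons, List.foldl_cons]
    have hcast : (k : Int) + 1 = ((k + 1 : Nat) : Int) := by push_cast; ring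
    rw [hcast]
    by_cases hbig : pvBig values v
    · -- dropped because it is a proper prefix of a longer value
      have hpreT : PySem.Set.contains (pvIsPre values) v = true := hbigiff.mpr hbig
      have hallF : ((pvS values).take k).all
          (fun longer => ! PySem.Str.startswith longer v) = false := by
        rw [← Bool.not_eq_true]
        intro hT
        exact (hcond.mp hT).2 hbig
      have hA : pvAf values kept ((k : Int), v) = kept := by
        simp only [pvAf, PySem.List.slice_to_natCast]
        rw [hallF]
        rfl
      have hB : pvBf values (seen, kept) v = (seen, kept) := by
        simp only [pvBf, hpreT]
        rfl
      rw [hA, hB]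
      refine ih (k+1) kept seen hdrop' ?_
      intro u
      rw [hseen u, htake]
      constructor
      · rintro ⟨hm, hnp⟩; exact ⟨by simp [hm], hnp⟩
      · rintro ⟨hm, hnp⟩
        rcases (by simpa using hm : u ∈ (pvS values).take k ∨ u = v) with hm' | rfl
        · exact ⟨hm', hnp⟩
        · rw [hpreT] at hnp; exact absurd hnp (by simp)
    · by_cases hmem : v ∈ (pvS values).take k
      · -- dropped as a duplicate
        have hseenT : PySem.Set.contains seen v = true := (hseen v).mpr
          ⟨hmem, by rw [← Bool.not_eq_true, hbigiff]; exact hbig⟩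
        have hallF : ((pvS values).take k).all
            (fun longer => ! PySem.Str.startswith longer v) = false := by
          rw [← Bool.not_eq_true]
          intro hT
          exact (hcond.mp hT).1 hmem
        have hA : pvAf values kept ((k : Int), v) = kept := by
          simp only [pvAf, PySem.List.slice_to_natCast]
          rw [hallF]
          rfl
        have hB : pvBf values (seen, kept) v = (seen, kept) := by
          simp only [pvBf, hseenT, Bool.or_true]
          rfl
        rw [hA, hB]
        refine ih (k+1) kept seen hdrop' ?_
        intro u
        rw [hseen u, htake]
        constructor
        · rintro ⟨hm, hnp⟩; exact ⟨by simp [hm], hnp⟩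
        · rintro ⟨hm, hnp⟩
          rcases (by simpa using hm : u ∈ (pvS values).take k ∨ u = v) with hm' | rfl
          · exact ⟨hm', hnp⟩
          · exact ⟨hmem, hnp⟩
      · -- kept
        have hpreF : PySem.Set.contains (pvIsPre values) v = false := by
          rw [← Bool.not_eq_true, hbigiff]; exact hbig
        have hseenF : PySem.Set.contains seen v = false := by
          rw [← Bool.not_eq_true, hseen v]
          rintro ⟨hm, _⟩
          exact hmem hm
        have hallT : ((pvS values).take k).all
            (fun longer => ! PySem.Str.startswith longer v) = true :=
          hcond.mpr ⟨hmem, hbig⟩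
        have hA : pvAf values kept ((k : Int), v) = kept ++ [v] := by
          simp only [pvAf, PySem.List.slice_to_natCast]
          rw [hallT]
          rfl
        have hB : pvBf values (seen, kept) v = (PySem.Set.add seen v, kept ++ [v]) := by
          simp only [pvBf, hpreF, hseenF]
          rfl
        rw [hA, hB]
        refine ih (k+1) (kept ++ [v]) (PySem.Set.add seen v) hdrop' ?_
        intro u
        rw [PySem.Set.contains_iff, PySem.Set.mem_add, htake]
        constructor
        · rintro (hu | rfl)
          · obtain ⟨hm, hnp⟩ := (hseen u).mp ((PySem.Set.contains_iff seen u).mpr hu)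
            exact ⟨by simp [hm], hnp⟩
          · exact ⟨by simp, hpreF⟩
        · rintro ⟨hm, hnp⟩
          rcases (by simpa using hm : u ∈ (pvS values).take k ∨ u = v) with hm' | rfl
          · exact Or.inl ((PySem.Set.contains_iff seen u).mp ((hseen u).mpr ⟨hm', hnp⟩))
          · exact Or.inr rfl

-- ===== VERDICT (by name: the statement is the Claim_ definition above) =====
theorem remove_prefix_date_values_spec : Claim_equal_remove_prefix_date_values := by
  intro values _
  unfold Spec_remove_prefix_date_values
  rw [pvA_eq, pvB_eq]
  have h := pvMain values (pvS values) 0 [] PySem.Set.empty (by simp)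
    (by intro u; simp [PySem.Set.empty])
  norm_num at h
  exact h
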